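-- pv_equiv track=rewrite | github.com/Theja94/Python-Tasks | Intermediate/Q6.py | check_power
-- ===== SOURCE A (Python) =====
-- def check_power(n):
--     n = n//2
--     if n == 2:
--         return True
--     elif n > 2:
--         return check_power(n)
--     else:
--         return False
-- ===== SOURCE B (Python) =====
-- def check_power(n):
--     n = n // 2
--     while n > 2:
--         n = n // 2
--     return n == 2
-- ===== Notes on version B (the rewrite author's own statement) =====
-- stated objective: idiomatic
-- what changed: Replaced the tail recursion by an explicit while loop that keeps halving until the threshold, then returns a single final equality test.
import Mathlib
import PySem

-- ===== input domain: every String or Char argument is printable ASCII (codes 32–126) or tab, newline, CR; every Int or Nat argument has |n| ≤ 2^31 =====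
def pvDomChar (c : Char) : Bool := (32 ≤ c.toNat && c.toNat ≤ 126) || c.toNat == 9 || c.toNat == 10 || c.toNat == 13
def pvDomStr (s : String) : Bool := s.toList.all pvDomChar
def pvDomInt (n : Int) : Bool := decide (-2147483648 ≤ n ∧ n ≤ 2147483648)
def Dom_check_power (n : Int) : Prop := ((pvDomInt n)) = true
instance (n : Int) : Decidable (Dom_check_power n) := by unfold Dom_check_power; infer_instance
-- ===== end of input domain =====

-- B replaces A's tail recursion by a plain while loop over the same halving; return values only, no side effects.

-- ===== PORT A =====
def check_power (n : Int) : Bool :=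
  if PySem.Int.floordiv n 2 = 2 then true
  else if PySem.Int.floordiv n 2 > 2 then check_power (PySem.Int.floordiv n 2)
  else false
termination_by n.toNat
decreasing_by
  rw [PySem.Int.floordiv_eq_ediv_of_pos (by omega : (0:Int) < 2)] at *
  omega

-- ===== PORT B =====
-- the while loop: halve while the value exceeds 2
def checkLoop (n : Int) : Int :=
  if n > 2 then checkLoop (PySem.Int.floordiv n 2) else n
termination_by n.toNat
decreasing_by
  rw [PySem.Int.floordiv_eq_ediv_of_pos (by omega : (0:Int) < 2)] at *
  omega

def check_power_alt (n : Int) : Bool :=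
  checkLoop (PySem.Int.floordiv n 2) == 2

-- ===== PRECONDITION & SPEC =====
def Spec_check_power (n : Int) (out : Bool) : Prop := out = check_power_alt n
instance (n : Int) (out : Bool) : Decidable (Spec_check_power n out) := by unfold Spec_check_power; infer_instance

-- ===== CLAIM (what is proved, stated in full; the proofs are below) =====
def Claim_equal_check_power : Prop := ∀ (n : Int), Dom_check_power n → Spec_check_power n (check_power n)

-- ===== LEMMAS AND PROOFS =====
theorem check_power_eq_loop (n : Int) : check_power n = (checkLoop (PySem.Int.floordiv n 2) == 2) := by
  induction n using check_power.induct with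
  | case1 n h =>
    rw [check_power, if_pos h, checkLoop, if_neg (by omega), h]
    decide
  | case2 n h1 h2 ih =>
    rw [check_power, if_neg h1, if_pos h2]
    conv_rhs => rw [checkLoop, if_pos h2]
    exact ih
  | case3 n h1 h2 =>
    rw [check_power, if_neg h1, if_neg h2, checkLoop, if_neg h2]
    exact (beq_eq_false_iff_ne.mpr h1).symm

-- ===== VERDICT (by name: the statement is the Claim_ definition above) =====
theorem check_power_spec : Claim_equal_check_power := by
  intro n _
  unfold Spec_check_power check_power_alt
  exact check_power_eq_loop n
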